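-- pv_equiv track=rewrite | github.com/DarkBiquette666/Fmod-Auto_Import | FmodImporter-Dev/fmod_importer/core/event_folder_manager.py | get_hierarchy
-- ===== SOURCE A (Python) =====
-- from typing import Dict, List, Optional, Tuple
--
-- def get_hierarchy(master_id: str, event_folders_dict: Dict) -> List[Tuple[str, str, int]]:
--     """
--     Get event folders as a hierarchical list.
--
--     Args:
--         master_id: ID of the master event folder
--         event_folders_dict: Dictionary of event folders
--
--     Returns:
--         List of tuples (folder_name, folder_id, depth)
--     """
--     def build_hierarchy(folder_id: str, depth: int = 0) -> List[Tuple[str, str, int]]: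
--         result = []
--         if folder_id in event_folders_dict:
--             folder = event_folders_dict[folder_id]
--             result.append((folder['name'], folder_id, depth))
--
--             # Find children
--             for fid, fdata in event_folders_dict.items():
--                 if fdata['parent'] == folder_id:
--                     result.extend(build_hierarchy(fid, depth + 1))
--
--         return result
--
--     return build_hierarchy(master_id)
-- ===== SOURCE B (Python) =====
-- def get_hierarchy(master_id, event_folders_dict):
--     """Same result as A, but a parent->children index is built once (one pass),
--     so the per-node scan of the whole dict disappears."""
--     if master_id not in event_folders_dict:
--         return []
--     children = {}
--     for fid, fdata in event_folders_dict.items():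
--         children.setdefault(fdata['parent'], []).append(fid)
--
--     def walk(fid, depth):
--         out = [(event_folders_dict[fid]['name'], fid, depth)]
--         for child in children.get(fid, ()):
--             out.extend(walk(child, depth + 1))
--         return out
--
--     return walk(master_id, 0)
-- ===== Notes on version B (the rewrite author's own statement) =====
-- stated objective: alternative
-- what changed: B builds a parent->children index in one pass and recursively walks that index, instead of A's rescan of the whole dict for children at every visited node.
import Mathlib
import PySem

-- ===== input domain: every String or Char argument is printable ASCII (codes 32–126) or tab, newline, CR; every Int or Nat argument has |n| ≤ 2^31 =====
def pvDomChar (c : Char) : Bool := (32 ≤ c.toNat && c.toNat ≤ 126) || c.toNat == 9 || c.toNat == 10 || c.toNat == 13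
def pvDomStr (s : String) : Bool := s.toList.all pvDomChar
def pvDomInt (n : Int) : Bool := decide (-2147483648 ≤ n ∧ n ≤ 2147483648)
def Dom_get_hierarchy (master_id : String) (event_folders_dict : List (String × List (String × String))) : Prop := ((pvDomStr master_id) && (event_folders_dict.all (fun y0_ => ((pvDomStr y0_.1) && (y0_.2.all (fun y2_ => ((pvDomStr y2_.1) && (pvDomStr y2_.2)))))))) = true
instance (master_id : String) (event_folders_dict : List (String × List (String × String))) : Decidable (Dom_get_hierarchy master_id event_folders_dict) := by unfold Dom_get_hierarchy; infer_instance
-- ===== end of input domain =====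

-- B replaces A's per-node scan of the whole dict by a parent→children index built in one pass.

-- ===== PORT A =====
-- inner dicts are association lists; pvLook l k = l[k] with default "" (Pre_ guarantees the key is present wherever A reads it)
def pvLook (l : List (String × String)) (k : String) : String :=
  (PySem.Dict.mk l).getD k ""

-- build_hierarchy, with fuel = |dict|+1 (sufficient under Pre_, which excludes parent-cycles through master_id, where Python A hits RecursionError)
def get_hierarchy_go (d : List (String × List (String × String))) : Nat → String → Int → List (String × String × Int)
  | 0, _, _ => []
  | fuel+1, folder_id, depth =>
    if (PySem.Dict.mk d).contains folder_id then
      let folder := (PySem.Dict.mk d).getD folder_id []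
      d.foldl (fun acc p =>
          if pvLook p.2 "parent" == folder_id then
            acc ++ get_hierarchy_go d fuel p.1 (depth + 1)
          else acc)
        [(pvLook folder "name", folder_id, depth)]
    else []

def get_hierarchy (master_id : String) (event_folders_dict : List (String × List (String × String))) : List (String × String × Int) :=
  get_hierarchy_go event_folders_dict (event_folders_dict.length + 1) master_id 0

-- ===== PORT B =====
-- children.setdefault(fdata['parent'], []).append(fid), one pass over the dict
def pvChildren (d : List (String × List (String × String))) : PySem.Dict String (List String) :=
  d.foldl (fun m p => m.modify (pvLook p.2 "parent") [] (· ++ [p.1])) PySem.Dict.empty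

-- walk, with the same fuel bound as A's recursion
def get_hierarchy_walk (d : List (String × List (String × String))) (children : PySem.Dict String (List String)) : Nat → String → Int → List (String × String × Int)
  | 0, _, _ => []
  | fuel+1, fid, depth =>
    (children.getD fid []).foldl
      (fun acc c => acc ++ get_hierarchy_walk d children fuel c (depth + 1))
      [(pvLook ((PySem.Dict.mk d).getD fid []) "name", fid, depth)]

def get_hierarchy_alt (master_id : String) (event_folders_dict : List (String × List (String × String))) : List (String × String × Int) :=
  if (PySem.Dict.mk event_folders_dict).contains master_id then
    get_hierarchy_walk event_folders_dict (pvChildren event_folders_dict) (event_folders_dict.length + 1) master_id 0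
  else []

-- ===== PRECONDITION & SPEC =====
-- parent pointer of key k (none if k not a key or 'parent' missing), and its j-th iterate
def pvParent? (d : List (String × List (String × String))) (k : String) : Option String :=
  match (PySem.Dict.mk d).get? k with
  | none => none
  | some v => (PySem.Dict.mk v).get? "parent"

def pvAncestor? (d : List (String × List (String × String))) : Nat → String → Option String
  | 0, k => some k
  | n+1, k =>
    match pvParent? d k with
    | none => none
    | some p => pvAncestor? d n p

-- A visits exactly the keys whose parent-pointer chain (through present keys) reaches master_id
def pvVisited (d : List (String × List (String × String))) (master_id fid : String) : Prop :=
  ∃ j ∈ List.range (d.length + 1), pvAncestor? d j fid = some master_id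

-- Pre_ excludes exactly inputs on which Python A raises or whose dict translation is ambiguous: duplicate
-- outer/inner association-list keys (a Python dict cannot carry them; the convention's lookup is first-match),
-- a 'parent' key missing on ANY entry while the master folder exists (A scans every entry, KeyError),
-- a 'name' key missing on a VISITED entry (KeyError when A emits it), and a parent-pointer cycle through
-- master_id (RecursionError).
def Pre_get_hierarchy (master_id : String) (event_folders_dict : List (String × List (String × String))) : Prop :=
  (event_folders_dict.map Prod.fst).Nodup ∧
  (∀ p ∈ event_folders_dict, (p.2.map Prod.fst).Nodup) ∧
  (master_id ∈ event_folders_dict.map Prod.fst →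
    (∀ p ∈ event_folders_dict, "parent" ∈ p.2.map Prod.fst) ∧
    (∀ p ∈ event_folders_dict, pvVisited event_folders_dict master_id p.1 → "name" ∈ p.2.map Prod.fst) ∧
    (∀ j ∈ List.range event_folders_dict.length, pvAncestor? event_folders_dict (j+1) master_id ≠ some master_id))

instance (master_id : String) (event_folders_dict : List (String × List (String × String))) : Decidable (Pre_get_hierarchy master_id event_folders_dict) := by
  unfold Pre_get_hierarchy pvVisited; infer_instance

def pvWitness_get_hierarchy : String × (List (String × List (String × String))) :=
  ("m", [("m", [("name", "Master"), ("parent", "")]), ("c", [("name", "C"), ("parent", "m")])])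

def Spec_get_hierarchy (master_id : String) (event_folders_dict : List (String × List (String × String))) (out : List (String × String × Int)) : Prop := out = get_hierarchy_alt master_id event_folders_dict
instance (master_id : String) (event_folders_dict : List (String × List (String × String))) (out : List (String × String × Int)) : Decidable (Spec_get_hierarchy master_id event_folders_dict out) := by unfold Spec_get_hierarchy; infer_instance

-- ===== CLAIM (what is proved, stated in full; the proofs are below) =====
def Claim_equal_get_hierarchy : Prop := ∀ (master_id : String) (event_folders_dict : List (String × List (String × String))), Dom_get_hierarchy master_id event_folders_dict → Pre_get_hierarchy master_id event_folders_dict → Spec_get_hierarchy master_id event_folders_dict (get_hierarchy master_id event_folders_dict)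

-- ===== LEMMAS AND PROOFS =====

-- 'if p x: out.extend(g x)' loop shape (the extend variant of PySem.List.foldl_append_if)
lemma pv_foldl_extend_if {α β : Type} (l : List α) (p : α → Bool) (g : α → List β) (acc : List β) :
    l.foldl (fun a x => if p x then a ++ g x else a) acc = acc ++ (l.filter p).flatMap g := by
  induction l generalizing acc with
  | nil => simp
  | cons h t ih =>
    by_cases hp : p h
    · simp [hp, ih, List.append_assoc]
    · simp [hp, ih]

-- the children index lists exactly the keys whose 'parent' field is c, in dict order
lemma pvChildren_getD (d : List (String × List (String × String))) (c : String) :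
    (pvChildren d).getD c [] = ((d.filter (fun p => pvLook p.2 "parent" == c)).map Prod.fst) := by
  unfold pvChildren
  have h := PySem.Dict.getD_foldl_modify_append
    (l := d.map (fun p => (pvLook p.2 "parent", p.1))) (d := (PySem.Dict.empty : PySem.Dict String (List String))) (c := c)
  rw [List.foldl_map] at h
  simp only [h, PySem.Dict.getD_empty, List.nil_append, List.filter_map, List.map_map]
  rfl

lemma pv_go_eq_walk (d : List (String × List (String × String))) :
    ∀ (fuel : Nat) (fid : String) (depth : Int), fid ∈ d.map Prod.fst →
      get_hierarchy_go d fuel fid depth = get_hierarchy_walk d (pvChildren d) fuel fid depth := by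
  intro fuel
  induction fuel with
  | zero => intro fid depth _; rfl
  | succ n ih =>
    intro fid depth hmem
    have hc : (PySem.Dict.mk d).contains fid = true := by
      rw [PySem.Dict.contains_eq_decide_mem_keys]
      simpa [PySem.Dict.keys_mk] using hmem
    simp only [get_hierarchy_go, get_hierarchy_walk, hc, if_pos]
    rw [pv_foldl_extend_if, PySem.List.foldl_append_eq_flatMap, pvChildren_getD, List.flatMap_map]
    congr 1
    apply List.flatMap_congr
    intro p hp
    have : p.1 ∈ d.map Prod.fst := List.mem_map_of_mem (List.mem_of_mem_filter hp)
    exact ih p.1 (depth + 1) this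

-- ===== VERDICT (by name: the statement is the Claim_ definition above) =====
theorem get_hierarchy_spec : Claim_equal_get_hierarchy := by
  intro m d _ _
  unfold Spec_get_hierarchy get_hierarchy get_hierarchy_alt
  by_cases hc : (PySem.Dict.mk d).contains m = true
  · have hmem : m ∈ d.map Prod.fst := by
      rw [PySem.Dict.contains_eq_decide_mem_keys] at hc
      simpa [PySem.Dict.keys_mk] using hc
    simp only [hc, if_pos]
    exact pv_go_eq_walk d (d.length + 1) m 0 hmem
  · simp only [Bool.not_eq_true] at hc
    simp [get_hierarchy_go, hc]
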